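-- pv_equiv track=rewrite | github.com/mdemichele/JanggiGame | JanggiGameClass.py | in_palace
-- ===== SOURCE A (Python) =====
-- def in_palace(location):
--     """Checks if a piece is in a palace, either its own or opposing palace"""
--     # Check if location matches a red_palace space. If match found, return True
--     red_palace = [[0,3], [0,4], [0,5], [1,3], [1,4], [1,5], [2,3], [2,4], [2,5]]
--     for space in red_palace:
--         if location[0] == space[0] and location[1] == space[1]:
--             return True
--
--     # Checks if location matches a blue_palace space. If match found, return False
--     blue_palace = [[9,3], [9,4], [9,5], [8,3], [8,4], [8,5], [7,3], [7,4], [7,5]]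
--     for space in blue_palace:
--         if location[0] == space[0] and location[1] == space[1]:
--             return True
--
--     # If no matches found, it's not in a palace, return false
--     return False
-- ===== SOURCE B (Python) =====
-- def in_palace(location):
--     """Checks if a piece is in a palace, either its own or opposing palace"""
--     # Closed-form bounds test: palace cells are exactly rows {0,1,2,7,8,9} x cols {3,4,5}.
--     # Row is tested first, so location[1] is only touched when the row matches (as in A).
--     return location[0] in (0, 1, 2, 7, 8, 9) and location[1] in (3, 4, 5)
-- ===== Notes on version B (the rewrite author's own statement) =====
-- stated objective: simpler
-- what changed: Replaced the two 9-element palace cell lists and their explicit scanning loops with a single closed-form membership test on the row and column coordinates, preserving the short-circuit order.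
import Mathlib
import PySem

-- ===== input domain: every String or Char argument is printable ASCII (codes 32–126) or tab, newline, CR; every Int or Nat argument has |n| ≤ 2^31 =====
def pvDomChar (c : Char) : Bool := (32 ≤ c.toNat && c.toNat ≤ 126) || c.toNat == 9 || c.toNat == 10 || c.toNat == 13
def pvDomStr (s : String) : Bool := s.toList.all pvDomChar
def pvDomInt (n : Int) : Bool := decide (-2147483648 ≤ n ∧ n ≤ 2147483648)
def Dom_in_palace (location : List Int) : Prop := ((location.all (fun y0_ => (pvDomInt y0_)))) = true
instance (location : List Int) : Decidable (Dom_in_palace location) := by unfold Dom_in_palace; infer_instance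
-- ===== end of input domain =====

-- B replaces A's two explicit scans of 9-cell palace lists with one closed-form
-- row/column membership test (simpler; same short-circuit order, so same raising inputs).


-- ===== PORT A =====
-- loop 'for space in palace: if location[0]==space[0] and location[1]==space[1]: return True'
def scanPalace (location : List Int) (palace : List (List Int)) : Bool :=
  match palace with
  | [] => false
  | space :: rest =>
      if PySem.List.pyGet? location 0 = PySem.List.pyGet? space 0 ∧
         PySem.List.pyGet? location 1 = PySem.List.pyGet? space 1 then true
      else scanPalace location rest

def in_palace (location : List Int) : Bool :=
  let red_palace : List (List Int) :=
    [[0,3],[0,4],[0,5],[1,3],[1,4],[1,5],[2,3],[2,4],[2,5]]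
  if scanPalace location red_palace then true
  else
    let blue_palace : List (List Int) :=
      [[9,3],[9,4],[9,5],[8,3],[8,4],[8,5],[7,3],[7,4],[7,5]]
    if scanPalace location blue_palace then true
    else false

-- ===== PORT B =====
-- 'location[0] in (0,1,2,7,8,9) and location[1] in (3,4,5)' with Python's short-circuit
def in_palace_alt (location : List Int) : Bool :=
  match PySem.List.pyGet? location 0 with
  | none => false   -- Python raises IndexError here; excluded by Pre_
  | some r =>
      if r ∈ ([0,1,2,7,8,9] : List Int) then
        match PySem.List.pyGet? location 1 with
        | none => false   -- IndexError; excluded by Pre_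
        | some c => decide (c ∈ ([3,4,5] : List Int))
      else false

-- ===== PRECONDITION & SPEC =====
-- Pre_ excludes exactly the inputs where both Pythons raise IndexError:
-- the empty list, and a length-1 list whose single entry is a palace row.
def Pre_in_palace (location : List Int) : Prop :=
  location ≠ [] ∧ (location.headI ∈ ([0,1,2,7,8,9] : List Int) → 2 ≤ location.length)
instance (location : List Int) : Decidable (Pre_in_palace location) := by
  unfold Pre_in_palace; infer_instance
def pvWitness_in_palace : List Int := [1, 4]
def Spec_in_palace (location : List Int) (out : Bool) : Prop := out = in_palace_alt location
instance (location : List Int) (out : Bool) : Decidable (Spec_in_palace location out) := by unfold Spec_in_palace; infer_instance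

-- ===== CLAIM (what is proved, stated in full; the proofs are below) =====
def Claim_equal_in_palace : Prop := ∀ (location : List Int), Dom_in_palace location → Pre_in_palace location → Spec_in_palace location (in_palace location)

-- ===== LEMMAS AND PROOFS =====
theorem palace_distrib (p q r s t u x y z : Prop) :
    ((p ∧ x ∨ p ∧ y ∨ p ∧ z ∨ q ∧ x ∨ q ∧ y ∨ q ∧ z ∨ r ∧ x ∨ r ∧ y ∨ r ∧ z) ∨
     (u ∧ x ∨ u ∧ y ∨ u ∧ z ∨ t ∧ x ∨ t ∧ y ∨ t ∧ z ∨ s ∧ x ∨ s ∧ y ∨ s ∧ z))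
    ↔ ((p ∨ q ∨ r ∨ s ∨ t ∨ u) ∧ (x ∨ y ∨ z)) := by
  constructor
  · rintro (h2 | h2)
    · rcases h2 with ⟨h,c⟩|⟨h,c⟩|⟨h,c⟩|⟨h,c⟩|⟨h,c⟩|⟨h,c⟩|⟨h,c⟩|⟨h,c⟩|⟨h,c⟩
      · exact ⟨Or.inl (h), Or.inl (c)⟩
      · exact ⟨Or.inl (h), Or.inr (Or.inl (c))⟩
      · exact ⟨Or.inl (h), Or.inr (Or.inr (c))⟩
      · exact ⟨Or.inr (Or.inl (h)), Or.inl (c)⟩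
      · exact ⟨Or.inr (Or.inl (h)), Or.inr (Or.inl (c))⟩
      · exact ⟨Or.inr (Or.inl (h)), Or.inr (Or.inr (c))⟩
      · exact ⟨Or.inr (Or.inr (Or.inl (h))), Or.inl (c)⟩
      · exact ⟨Or.inr (Or.inr (Or.inl (h))), Or.inr (Or.inl (c))⟩
      · exact ⟨Or.inr (Or.inr (Or.inl (h))), Or.inr (Or.inr (c))⟩
    · rcases h2 with ⟨h,c⟩|⟨h,c⟩|⟨h,c⟩|⟨h,c⟩|⟨h,c⟩|⟨h,c⟩|⟨h,c⟩|⟨h,c⟩|⟨h,c⟩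
      · exact ⟨Or.inr (Or.inr (Or.inr (Or.inr (Or.inr (h))))), Or.inl (c)⟩
      · exact ⟨Or.inr (Or.inr (Or.inr (Or.inr (Or.inr (h))))), Or.inr (Or.inl (c))⟩
      · exact ⟨Or.inr (Or.inr (Or.inr (Or.inr (Or.inr (h))))), Or.inr (Or.inr (c))⟩
      · exact ⟨Or.inr (Or.inr (Or.inr (Or.inr (Or.inl (h))))), Or.inl (c)⟩
      · exact ⟨Or.inr (Or.inr (Or.inr (Or.inr (Or.inl (h))))), Or.inr (Or.inl (c))⟩
      · exact ⟨Or.inr (Or.inr (Or.inr (Or.inr (Or.inl (h))))), Or.inr (Or.inr (c))⟩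
      · exact ⟨Or.inr (Or.inr (Or.inr (Or.inl (h)))), Or.inl (c)⟩
      · exact ⟨Or.inr (Or.inr (Or.inr (Or.inl (h)))), Or.inr (Or.inl (c))⟩
      · exact ⟨Or.inr (Or.inr (Or.inr (Or.inl (h)))), Or.inr (Or.inr (c))⟩
  · rintro ⟨hp, hc⟩
    rcases hp with h|h|h|h|h|h <;> rcases hc with c|c|c
    · exact Or.inl (Or.inl (⟨h, c⟩))
    · exact Or.inl (Or.inr (Or.inl (⟨h, c⟩)))
    · exact Or.inl (Or.inr (Or.inr (Or.inl (⟨h, c⟩))))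
    · exact Or.inl (Or.inr (Or.inr (Or.inr (Or.inl (⟨h, c⟩)))))
    · exact Or.inl (Or.inr (Or.inr (Or.inr (Or.inr (Or.inl (⟨h, c⟩))))))
    · exact Or.inl (Or.inr (Or.inr (Or.inr (Or.inr (Or.inr (Or.inl (⟨h, c⟩)))))))
    · exact Or.inl (Or.inr (Or.inr (Or.inr (Or.inr (Or.inr (Or.inr (Or.inl (⟨h, c⟩))))))))
    · exact Or.inl (Or.inr (Or.inr (Or.inr (Or.inr (Or.inr (Or.inr (Or.inr (Or.inl (⟨h, c⟩)))))))))
    · exact Or.inl (Or.inr (Or.inr (Or.inr (Or.inr (Or.inr (Or.inr (Or.inr (Or.inr (⟨h, c⟩)))))))))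
    · exact Or.inr (Or.inr (Or.inr (Or.inr (Or.inr (Or.inr (Or.inr (Or.inl (⟨h, c⟩))))))))
    · exact Or.inr (Or.inr (Or.inr (Or.inr (Or.inr (Or.inr (Or.inr (Or.inr (Or.inl (⟨h, c⟩)))))))))
    · exact Or.inr (Or.inr (Or.inr (Or.inr (Or.inr (Or.inr (Or.inr (Or.inr (Or.inr (⟨h, c⟩)))))))))
    · exact Or.inr (Or.inr (Or.inr (Or.inr (Or.inl (⟨h, c⟩)))))
    · exact Or.inr (Or.inr (Or.inr (Or.inr (Or.inr (Or.inl (⟨h, c⟩))))))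
    · exact Or.inr (Or.inr (Or.inr (Or.inr (Or.inr (Or.inr (Or.inl (⟨h, c⟩)))))))
    · exact Or.inr (Or.inl (⟨h, c⟩))
    · exact Or.inr (Or.inr (Or.inl (⟨h, c⟩)))
    · exact Or.inr (Or.inr (Or.inr (Or.inl (⟨h, c⟩))))

theorem in_palace_two (a b : Int) (t : List Int) :
    in_palace (a :: b :: t) = in_palace_alt (a :: b :: t) := by
  have h0 : PySem.List.pyGet? (a :: b :: t) 0 = some a := by
    simp [pysem]
  have h1 : PySem.List.pyGet? (a :: b :: t) 1 = some b := by
    simp [pysem]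
  simp only [in_palace, in_palace_alt, scanPalace, h0, h1,
    Bool.if_true_left, Bool.if_false_right]
  rw [Bool.eq_iff_iff]
  simp only [Bool.or_eq_true, Bool.and_eq_true, decide_eq_true_eq]
  simp only [PySem.List.pyGet?_ofNat', and_true,
    List.getElem?_cons_zero, List.getElem?_cons_succ, Option.some.injEq,
    List.mem_cons, List.not_mem_nil, or_false]
  exact palace_distrib _ _ _ _ _ _ _ _ _

-- ===== VERDICT (by name: the statement is the Claim_ definition above) =====
theorem in_palace_spec : Claim_equal_in_palace := by
  intro location _ hpre
  unfold Spec_in_palace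
  match location with
  | [] => exact absurd rfl hpre.1
  | [a] =>
      have h := hpre.2
      simp only [List.headI, List.length] at h
      have ha : a ∉ ([0,1,2,7,8,9] : List Int) := by
        intro hm
        have := h (by simpa using hm)
        simp at this
      simp at ha
      obtain ⟨h0, h1, h2, h7, h8, h9⟩ := ha
      simp only [in_palace, in_palace_alt, scanPalace, PySem.List.pyGet?, PySem.List.pyIdx?]
      norm_num
      simp_all
  | a :: b :: t => exact in_palace_two a b t
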